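-- pv_equiv track=rewrite | github.com/razaool/tennis-career-tracker | scripts/load_washington_2025.py | parse_score_details
-- ===== SOURCE A (Python) =====
-- def parse_score_details(score):
--     """Parse score to get sets won by each player"""
--     if not score:
--         return None, None, None, None
--
--     sets_p1 = 0
--     sets_p2 = 0
--     games_p1 = 0
--     games_p2 = 0
--
--     if 'RET' in score or 'W/O' in score:
--         return 2, 0, 0, 0
--
--     sets = score.split()
--
--     for set_score in sets:
--         if '(' in set_score:
--             set_score = set_score.split('(')[0]
--
--         if '-' in set_score:
--             parts = set_score.split('-')
--             if len(parts) == 2: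
--                 try:
--                     g1, g2 = int(parts[0]), int(parts[1])
--                     games_p1 += g1
--                     games_p2 += g2
--
--                     if g1 > g2:
--                         sets_p1 += 1
--                     elif g2 > g1:
--                         sets_p2 += 1
--                 except ValueError:
--                     continue
--
--     return sets_p1, sets_p2, games_p1, games_p2
-- ===== SOURCE B (Python) =====
-- def parse_score_details(score):
--     """Parse score to get sets won by each player"""
--     if not score:
--         return None, None, None, None
--     if 'RET' in score or 'W/O' in score:
--         return 2, 0, 0, 0
--     return _tally(score.split())
--
--
-- def _tally(toks):
--     """Recursively tally the token list, combining each head with the tail's totals."""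
--     if not toks:
--         return 0, 0, 0, 0
--     s1, s2, t1, t2 = _tally(toks[1:])
--     parts = toks[0].split('(')[0].split('-')
--     if len(parts) == 2:
--         try:
--             a, b = int(parts[0]), int(parts[1])
--             return s1 + (a > b), s2 + (b > a), t1 + a, t2 + b
--         except ValueError:
--             pass
--     return s1, s2, t1, t2
-- ===== Notes on version B (the rewrite author's own statement) =====
-- stated objective: alternative
-- what changed: B replaces A's iterative loop threading four counters by a structural recursion over the token list that combines each head's parse with the tail's totals, and drops A's separator membership guards by splitting unconditionally and testing only the part count.
import Mathlib
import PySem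

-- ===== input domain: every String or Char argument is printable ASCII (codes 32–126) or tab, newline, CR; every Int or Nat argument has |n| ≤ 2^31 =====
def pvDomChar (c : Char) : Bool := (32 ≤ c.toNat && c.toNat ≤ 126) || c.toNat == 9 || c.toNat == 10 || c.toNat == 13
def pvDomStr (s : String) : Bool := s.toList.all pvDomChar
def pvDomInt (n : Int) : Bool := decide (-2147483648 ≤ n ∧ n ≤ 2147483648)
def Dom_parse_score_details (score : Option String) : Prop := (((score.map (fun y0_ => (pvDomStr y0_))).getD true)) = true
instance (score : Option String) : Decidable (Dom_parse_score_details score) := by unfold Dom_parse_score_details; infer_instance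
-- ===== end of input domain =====

-- B replaces A's four-counter accumulator loop by a structural recursion over the token list that
-- combines each head with the tail's totals, and drops A's separator membership guards by splitting
-- unconditionally and testing only the part count (alternative decomposition; same cost).


-- ===== PORT A =====
-- A's line "if '(' in tok: tok = tok.split('(')[0]"
-- ('(' is a nonempty separator, so split? is always 'some' of a nonempty list; getD/headD are totalization guards)
def psdStripParen (tok : String) : String :=
  if PySem.Str.isIn "(" tok then (((PySem.Str.split? tok "(").getD []).headD "") else tok

def parse_score_details (score : Option String) : Option Int × Option Int × Option Int × Option Int :=
  match score with
  | none => (none, none, none, none)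
  | some s =>
    if s = "" then (none, none, none, none)
    else if PySem.Str.isIn "RET" s || PySem.Str.isIn "W/O" s then (some 2, some 0, some 0, some 0)
    else
      let sets := PySem.Str.split₀ s
      let st := sets.foldl (fun (st : Int × Int × Int × Int) set_score =>
        let set_score := psdStripParen set_score
        if PySem.Str.isIn "-" set_score then
          let parts := (PySem.Str.split? set_score "-").getD []
          if parts.length = 2 then
            match PySem.Int.ofStr? (parts.getD 0 ""), PySem.Int.ofStr? (parts.getD 1 "") with
            | some g1, some g2 =>
              (st.1 + (if g1 > g2 then 1 else 0), st.2.1 + (if g2 > g1 then 1 else 0),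
               st.2.2.1 + g1, st.2.2.2 + g2)
            | _, _ => st
          else st
        else st) ((0 : Int), (0 : Int), (0 : Int), (0 : Int))
      (some st.1, some st.2.1, some st.2.2.1, some st.2.2.2)

-- ===== PORT B =====
-- B's helper _tally: structural recursion over the token list, combining the head's parse with the
-- tail's result; "toks[0].split('(')[0].split('-')" ported with the same totalization guards as A's split
def psdTally : List String → Int × Int × Int × Int
  | [] => ((0 : Int), (0 : Int), (0 : Int), (0 : Int))
  | tok :: toks =>
    let r := psdTally toks
    let parts := (PySem.Str.split? (((PySem.Str.split? tok "(").getD []).headD "") "-").getD []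
    if parts.length = 2 then
      -- "try: a, b = int(parts[0]), int(parts[1]) … except ValueError: pass": either int() failing skips
      (PySem.Int.ofStr? (parts.getD 0 "")).elim r (fun a =>
        (PySem.Int.ofStr? (parts.getD 1 "")).elim r (fun b =>
          (r.1 + (if a > b then 1 else 0), r.2.1 + (if b > a then 1 else 0),
           r.2.2.1 + a, r.2.2.2 + b)))
    else r

def parse_score_details_alt (score : Option String) : Option Int × Option Int × Option Int × Option Int :=
  score.elim (none, none, none, none) (fun s =>
    if s = "" then (none, none, none, none)
    else if PySem.Str.isIn "RET" s || PySem.Str.isIn "W/O" s then (some 2, some 0, some 0, some 0)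
    else
      let r := psdTally (PySem.Str.split₀ s)
      (some r.1, some r.2.1, some r.2.2.1, some r.2.2.2))

-- ===== PRECONDITION & SPEC =====
def Spec_parse_score_details (score : Option String) (out : Option Int × Option Int × Option Int × Option Int) : Prop := out = parse_score_details_alt score
instance (score : Option String) (out : Option Int × Option Int × Option Int × Option Int) : Decidable (Spec_parse_score_details score out) := by unfold Spec_parse_score_details; infer_instance

-- ===== CLAIM (what is proved, stated in full; the proofs are below) =====
def Claim_equal_parse_score_details : Prop := ∀ (score : Option String), Dom_parse_score_details score → Spec_parse_score_details score (parse_score_details score)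

-- ===== LEMMAS AND PROOFS =====

/-- splitOn.go on a list that nowhere starts with the (nonempty) separator just walks the list. -/
theorem psd_splitOn_go_no_sep (sep : List Char) :
    ∀ (fuel : Nat) (l cur : List Char) (acc : List (List Char)),
      (∀ j, ¬ sep <+: l.drop j) →
      PySem.Chars.splitOn.go sep fuel l cur acc = acc.reverse ++ [cur.reverse ++ l] := by
  intro fuel
  induction fuel with
  | zero => intro l cur acc _; simp [PySem.Chars.splitOn.go]
  | succ n ih =>
    intro l cur acc h
    match l with
    | [] => simp [PySem.Chars.splitOn.go]
    | c :: rest =>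
      have hpre : sep.isPrefixOf (c :: rest) = false := by
        by_contra hc
        exact h 0 (by simpa using List.isPrefixOf_iff_prefix.mp (by simpa using hc))
      have hrest : ∀ j, ¬ sep <+: rest.drop j := fun j => by
        simpa using h (j + 1)
      rw [PySem.Chars.splitOn.go]
      simp [hpre, ih rest (c :: cur) acc hrest]

/-- Splitting on a nonempty separator that does not occur returns the whole string. -/
theorem psd_split?_of_not_isIn (s sep : String) (hsep : sep.toList ≠ [])
    (h : PySem.Str.isIn sep s = false) : PySem.Str.split? s sep = some [s] := by
  have hchars : PySem.Chars.split? s.toList sep.toList = some [s.toList] := by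
    have hinf : ¬ sep.toList <:+: s.toList := by
      simpa using (PySem.Chars.isIn_eq_false_iff sep.toList s.toList).mp (by simpa using h)
    have hdrop : ∀ j, ¬ sep.toList <+: s.toList.drop j := by
      intro j hp
      have hIn : PySem.Chars.isIn sep.toList s.toList = true :=
        (PySem.Chars.exists_prefix_drop_iff_isIn sep.toList s.toList).mp ⟨j, hp⟩
      exact hinf ((PySem.Chars.isIn_iff_infix sep.toList s.toList).mp hIn)
    unfold PySem.Chars.split? PySem.Chars.splitOn
    simp [hsep, psd_splitOn_go_no_sep sep.toList _ s.toList [] [] hdrop]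
  have := PySem.Str.split?_map s sep
  rw [hchars] at this
  match hsplit : PySem.Str.split? s sep with
  | none => rw [hsplit] at this; simp at this
  | some parts =>
    rw [hsplit] at this
    simp only [Option.map_some, Option.some.injEq] at this
    match parts with
    | [p] =>
      have hp : p.toList = s.toList := by simpa using this
      have : p = s := by
        have := congrArg String.ofList hp
        simpa using this
      rw [this]
    | [] => simp at this
    | _ :: _ :: _ => simp at this

/-- the per-token parse A's loop body performs, as an Option -/
def psdTok? (tok : String) : Option (Int × Int) :=
  if PySem.Str.isIn "-" (psdStripParen tok) then
    if ((PySem.Str.split? (psdStripParen tok) "-").getD []).length = 2 then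
      match PySem.Int.ofStr? (((PySem.Str.split? (psdStripParen tok) "-").getD []).getD 0 ""),
            PySem.Int.ofStr? (((PySem.Str.split? (psdStripParen tok) "-").getD []).getD 1 "") with
      | some g1, some g2 => some (g1, g2)
      | _, _ => none
    else none
  else none

/-- A's guarded strip equals B's unconditional split-and-take-head. -/
theorem psdStrip_eq (tok : String) :
    (((PySem.Str.split? tok "(").getD []).headD "") = psdStripParen tok := by
  unfold psdStripParen
  rcases h : PySem.Str.isIn "(" tok
  · rw [if_neg (by simp), psd_split?_of_not_isIn tok "(" (by decide) h]
    rfl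
  · simp

/-- A's loop body, rephrased through psdTok? -/
theorem psdStepA_eq :
    (fun (st : Int × Int × Int × Int) set_score =>
      let set_score := psdStripParen set_score
      if PySem.Str.isIn "-" set_score then
        let parts := (PySem.Str.split? set_score "-").getD []
        if parts.length = 2 then
          match PySem.Int.ofStr? (parts.getD 0 ""), PySem.Int.ofStr? (parts.getD 1 "") with
          | some g1, some g2 =>
            (st.1 + (if g1 > g2 then 1 else 0), st.2.1 + (if g2 > g1 then 1 else 0),
             st.2.2.1 + g1, st.2.2.2 + g2)
          | _, _ => st
        else st
      else st) =
    (fun (st : Int × Int × Int × Int) tok =>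
      match psdTok? tok with
      | some p => (st.1 + (if p.1 > p.2 then 1 else 0), st.2.1 + (if p.2 > p.1 then 1 else 0),
                   st.2.2.1 + p.1, st.2.2.2 + p.2)
      | none => st) := by
  funext st tok
  simp only [psdTok?]
  split_ifs with h1 h2
  · rcases PySem.Int.ofStr? (((PySem.Str.split? (psdStripParen tok) "-").getD []).getD 0 "") with _ | g1 <;>
    rcases PySem.Int.ofStr? (((PySem.Str.split? (psdStripParen tok) "-").getD []).getD 1 "") with _ | g2 <;> simp
  · simp
  · simp

/-- B's unguarded per-token step computes the psdTok?-combination too. -/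
theorem psdStepB_eq (r : Int × Int × Int × Int) (tok : String) :
    (if ((PySem.Str.split? (((PySem.Str.split? tok "(").getD []).headD "") "-").getD []).length = 2 then
       (PySem.Int.ofStr? (((PySem.Str.split? (((PySem.Str.split? tok "(").getD []).headD "") "-").getD []).getD 0 "")).elim r (fun a =>
         (PySem.Int.ofStr? (((PySem.Str.split? (((PySem.Str.split? tok "(").getD []).headD "") "-").getD []).getD 1 "")).elim r (fun b =>
           (r.1 + (if a > b then 1 else 0), r.2.1 + (if b > a then 1 else 0),
            r.2.2.1 + a, r.2.2.2 + b)))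
     else r) =
    match psdTok? tok with
    | some p => (r.1 + (if p.1 > p.2 then 1 else 0), r.2.1 + (if p.2 > p.1 then 1 else 0),
                 r.2.2.1 + p.1, r.2.2.2 + p.2)
    | none => r := by
  rw [psdStrip_eq]
  unfold psdTok?
  rcases h : PySem.Str.isIn "-" (psdStripParen tok)
  · rw [psd_split?_of_not_isIn _ "-" (by decide) h]
    simp
  · rw [if_pos rfl]
    split_ifs with h2
    · rcases PySem.Int.ofStr? (((PySem.Str.split? (psdStripParen tok) "-").getD []).getD 0 "") with _ | g1 <;>
      rcases PySem.Int.ofStr? (((PySem.Str.split? (psdStripParen tok) "-").getD []).getD 1 "") with _ | g2 <;> simp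
    · simp

/-- closed form of A's left fold over the four counters -/
theorem psd_foldA_clean (toks : List String) (a b c d : Int) :
    toks.foldl (fun (st : Int × Int × Int × Int) tok =>
      match psdTok? tok with
      | some p => (st.1 + (if p.1 > p.2 then 1 else 0), st.2.1 + (if p.2 > p.1 then 1 else 0),
                   st.2.2.1 + p.1, st.2.2.2 + p.2)
      | none => st) (a, b, c, d) =
    (a + ((toks.filterMap psdTok?).countP (fun p => p.1 > p.2) : Nat),
     b + ((toks.filterMap psdTok?).countP (fun p => p.2 > p.1) : Nat),
     c + ((toks.filterMap psdTok?).map Prod.fst).sum,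
     d + ((toks.filterMap psdTok?).map Prod.snd).sum) := by
  induction toks generalizing a b c d with
  | nil => simp
  | cons t ts ih =>
    rcases h : psdTok? t with _ | ⟨g1, g2⟩
    · simp [h, ih]
    · simp only [List.foldl_cons, List.filterMap_cons, h, ih, List.countP_cons, List.map_cons,
        List.sum_cons]
      by_cases hgt : g1 > g2 <;> by_cases hlt : g2 > g1 <;>
        simp only [hgt, hlt, if_true, if_false, decide_true, decide_false] <;>
        refine Prod.ext ?_ (Prod.ext ?_ (Prod.ext ?_ ?_)) <;> simp <;> ring

/-- B's recursion reaches the same closed form -/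
theorem psd_tally_clean (toks : List String) :
    psdTally toks =
    ((((toks.filterMap psdTok?).countP (fun p => p.1 > p.2) : Nat) : Int),
     (((toks.filterMap psdTok?).countP (fun p => p.2 > p.1) : Nat) : Int),
     ((toks.filterMap psdTok?).map Prod.fst).sum,
     ((toks.filterMap psdTok?).map Prod.snd).sum) := by
  induction toks with
  | nil => simp [psdTally]
  | cons t ts ih =>
    simp only [psdTally]
    rw [ih, psdStepB_eq]
    rcases h : psdTok? t with _ | ⟨g1, g2⟩
    · simp [h]
    · simp only [List.filterMap_cons, h, List.countP_cons, List.map_cons, List.sum_cons]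
      by_cases hgt : g1 > g2 <;> by_cases hlt : g2 > g1 <;>
        simp only [hgt, hlt, if_true, if_false, decide_true, decide_false] <;>
        refine Prod.ext ?_ (Prod.ext ?_ (Prod.ext ?_ ?_)) <;> simp <;> ring

-- ===== VERDICT (by name: the statement is the Claim_ definition above) =====
theorem parse_score_details_spec : Claim_equal_parse_score_details := by
  intro score _
  unfold Spec_parse_score_details
  cases score with
  | none => rfl
  | some s =>
    simp only [parse_score_details, parse_score_details_alt, Option.elim]
    split_ifs with h1 h2
    · rfl
    · rfl
    · rw [psdStepA_eq, psd_foldA_clean, psd_tally_clean]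
      simp
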